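-- pv_equiv track=rewrite | github.com/schorm/EA-Eight_queens | survivor_selection.py | mu_plus_lambda
-- ===== SOURCE A (Python) =====
-- def mu_plus_lambda(current_pop, current_fitness, offspring, offspring_fitness):
--     """mu+lambda selection"""
--     population = []
--     fitness = []
--
--     # student code starts
--     mu=len(current_pop)
--     pop=current_pop+offspring
--     fit=current_fitness+offspring_fitness
--     pop = [x for _, x in sorted(zip(fit, pop), key=lambda pair: pair[0], reverse=True)]
--     fit.sort(reverse=True)
--     population=pop[:mu]
--     fitness=fit[:mu]
--     # student code ends
--
--     return population, fitness
-- ===== SOURCE B (Python) =====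
-- def mu_plus_lambda(current_pop, current_fitness, offspring, offspring_fitness):
--     """mu+lambda selection by a single online bounded-insertion pass keeping the
--     current top-mu in descending order (no full sort, no heap)."""
--     mu = len(current_pop)
--
--     def top_mu(items, key):
--         kept = []
--         for x in items:
--             i = 0
--             while i < len(kept) and not (key(kept[i]) < key(x)):
--                 i += 1
--             kept.insert(i, x)
--             kept = kept[:mu]
--         return kept
--
--     fit = current_fitness + offspring_fitness
--     survivors = top_mu(list(zip(fit, current_pop + offspring)), lambda p: p[0])
--     fitness = top_mu(fit, lambda f: f)
--     return [x for _, x in survivors], fitness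
-- ===== Notes on version B (the rewrite author's own statement) =====
-- stated objective: alternative
-- what changed: A fully sorts the zipped (fitness, individual) pairs and then fully sorts the fitness list a second time; B never sorts: it makes one online pass per output, maintaining only the current top-mu elements in a bounded list by stable descending insertion and truncation.
import Mathlib
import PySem

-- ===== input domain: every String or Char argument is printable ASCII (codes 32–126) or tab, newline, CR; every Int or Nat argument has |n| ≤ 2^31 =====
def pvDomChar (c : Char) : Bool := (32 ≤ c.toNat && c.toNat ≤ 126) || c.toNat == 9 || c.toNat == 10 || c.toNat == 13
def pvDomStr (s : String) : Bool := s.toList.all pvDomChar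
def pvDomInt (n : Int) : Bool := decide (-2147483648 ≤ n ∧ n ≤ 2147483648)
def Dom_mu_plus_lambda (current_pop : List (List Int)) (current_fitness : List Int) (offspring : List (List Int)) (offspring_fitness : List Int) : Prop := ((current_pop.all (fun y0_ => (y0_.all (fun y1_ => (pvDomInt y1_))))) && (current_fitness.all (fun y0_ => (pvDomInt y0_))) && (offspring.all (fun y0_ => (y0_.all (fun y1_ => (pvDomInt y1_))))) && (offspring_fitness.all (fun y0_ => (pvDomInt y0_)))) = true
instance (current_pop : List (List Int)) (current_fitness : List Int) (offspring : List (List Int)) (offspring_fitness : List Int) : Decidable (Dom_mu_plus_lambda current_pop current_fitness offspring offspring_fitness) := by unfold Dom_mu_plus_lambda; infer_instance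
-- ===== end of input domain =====

-- B replaces A's two full sorts by a single online bounded-insertion pass per output,
-- keeping only the current top-mu in descending order (alternative algorithm).

-- ===== PORT A =====
def mu_plus_lambda (current_pop : List (List Int)) (current_fitness : List Int) (offspring : List (List Int)) (offspring_fitness : List Int) : List (List Int) × List Int :=
  let mu := current_pop.length
  let pop := current_pop ++ offspring
  let fit := current_fitness ++ offspring_fitness
  -- pop = [x for _, x in sorted(zip(fit, pop), key=lambda pair: pair[0], reverse=True)]
  let pop2 := (PySem.List.sorted (fit.zip pop) (fun pair => pair.1) true).map (fun p => p.2)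
  -- fit.sort(reverse=True)
  let fitSorted := PySem.List.sorted fit (fun x => x) true
  (pop2.take mu, fitSorted.take mu)

-- ===== PORT B =====
-- the body of B's while/insert: scan past every kept element whose key is not below
-- key(x), insert x there (stable descending insertion)
def pvInsertDesc {α : Type} (key : α → Int) (x : α) : List α → List α
  | [] => [x]
  | y :: ys => if key y < key x then x :: y :: ys else y :: pvInsertDesc key x ys

-- B's top_mu: fold over the items, insert each, then 'kept = kept[:mu]' (mu = len ≥ 0, so take)
def pvTopMu {α : Type} (mu : Nat) (key : α → Int) (items : List α) : List α :=
  items.foldl (fun kept x => (pvInsertDesc key x kept).take mu) []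

def mu_plus_lambda_alt (current_pop : List (List Int)) (current_fitness : List Int) (offspring : List (List Int)) (offspring_fitness : List Int) : List (List Int) × List Int :=
  let mu := current_pop.length
  let fit := current_fitness ++ offspring_fitness
  let survivors := pvTopMu mu (fun p => p.1) (fit.zip (current_pop ++ offspring))
  let fitness := pvTopMu mu (fun f => f) fit
  (survivors.map (fun p => p.2), fitness)

-- ===== PRECONDITION & SPEC =====
def Spec_mu_plus_lambda (current_pop : List (List Int)) (current_fitness : List Int) (offspring : List (List Int)) (offspring_fitness : List Int) (out : List (List Int) × List Int) : Prop := out = mu_plus_lambda_alt current_pop current_fitness offspring offspring_fitness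
instance (current_pop : List (List Int)) (current_fitness : List Int) (offspring : List (List Int)) (offspring_fitness : List Int) (out : List (List Int) × List Int) : Decidable (Spec_mu_plus_lambda current_pop current_fitness offspring offspring_fitness out) := by unfold Spec_mu_plus_lambda; infer_instance

-- ===== CLAIM =====
def Claim_equal_mu_plus_lambda : Prop := ∀ (current_pop : List (List Int)) (current_fitness : List Int) (offspring : List (List Int)) (offspring_fitness : List Int), Dom_mu_plus_lambda current_pop current_fitness offspring offspring_fitness → Spec_mu_plus_lambda current_pop current_fitness offspring offspring_fitness (mu_plus_lambda current_pop current_fitness offspring offspring_fitness)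

-- ===== LEMMAS AND PROOFS =====

-- B's hand-written insertion is PySem's stable insertBy under the reverse comparison
theorem pv_insertDesc_eq_insertBy {α : Type} (key : α → Int) (x : α) (l : List α) :
    pvInsertDesc key x l = PySem.List.insertBy (fun a b => decide (key b < key a)) x l := by
  induction l with
  | nil => rfl
  | cons y ys ih => simp [pvInsertDesc, PySem.List.insertBy, ih]

-- truncating the accumulator before an insertion does not change the truncated result
theorem pv_take_insertDesc {α : Type} (key : α → Int) (x : α) :
    ∀ (k : Nat) (l : List α),
      ((pvInsertDesc key x (l.take k)).take k) = (pvInsertDesc key x l).take k := by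
  intro k l
  induction l generalizing k with
  | nil => simp
  | cons y ys ih =>
    cases k with
    | zero => simp
    | succ k' =>
      simp only [List.take_succ_cons, pvInsertDesc]
      by_cases h : key y < key x
      · simp only [if_pos h, List.take_succ_cons]
        cases k' with
        | zero => simp
        | succ k'' => simp [List.take_take]
      · simp [if_neg h, ih]

-- hence the truncating fold equals truncating the plain insertion fold at the end
theorem pv_foldl_take_insertDesc {α : Type} (key : α → Int) (k : Nat) :
    ∀ (l acc : List α),
      l.foldl (fun kept x => (pvInsertDesc key x kept).take k) (acc.take k)
        = (l.foldl (fun kept x => pvInsertDesc key x kept) acc).take k := by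
  intro l
  induction l with
  | nil => intro acc; rfl
  | cons x xs ih =>
    intro acc
    simp only [List.foldl_cons]
    rw [pv_take_insertDesc, ih]

-- top_mu items = sorted(items, reverse=True)[:mu]
theorem pv_topMu_eq_sorted_take {α : Type} (mu : Nat) (key : α → Int) (items : List α) :
    pvTopMu mu key items = (PySem.List.sorted items key true).take mu := by
  unfold pvTopMu
  rw [PySem.List.sorted_rev_eq_foldl_insertBy]
  have h := pv_foldl_take_insertDesc key mu items []
  simp only [List.take_nil] at h
  rw [h]
  simp only [pv_insertDesc_eq_insertBy]

-- ===== VERDICT =====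
theorem mu_plus_lambda_spec : Claim_equal_mu_plus_lambda := by
  intro current_pop current_fitness offspring offspring_fitness _
  unfold Spec_mu_plus_lambda mu_plus_lambda mu_plus_lambda_alt
  dsimp only
  rw [pv_topMu_eq_sorted_take, pv_topMu_eq_sorted_take, List.map_take]
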